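-- pv_equiv track=rewrite | github.com/Whaleylaw/Roscoe | scripts/categorize_old_providers_by_system.py | categorize_provider
-- ===== SOURCE A (Python) =====
-- def categorize_provider(provider_name: str) -> str:
--     """Determine which health system a provider belongs to."""
--
--     name_lower = provider_name.lower()
--
--     # Norton Healthcare
--     norton_keywords = ['norton', 'kosair']
--     if any(keyword in name_lower for keyword in norton_keywords):
--         return "Norton Healthcare"
--
--     # UofL Health
--     uofl_keywords = ['uofl', 'university of louisville', 'u of l', 'jewish hospital', 'peace hospital',
--                      'jewish', 'mary & elizabeth', 'mary and elizabeth', 'shelbyville hospital']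
--     if any(keyword in name_lower for keyword in uofl_keywords):
--         return "UofL Health"
--
--     # Baptist Health
--     baptist_keywords = ['baptist']
--     if any(keyword in name_lower for keyword in baptist_keywords):
--         return "Baptist Health"
--
--     # CHI Saint Joseph Health
--     chi_keywords = ['chi saint joseph', 'saint joseph', 'st joseph', 'st. joseph', 'flaget']
--     if any(keyword in name_lower for keyword in chi_keywords):
--         return "CHI Saint Joseph Health"
--
--     # St. Elizabeth Healthcare
--     st_elizabeth_keywords = ['st elizabeth', 'st. elizabeth', 'saint elizabeth', 'stelizabeth']
--     if any(keyword in name_lower for keyword in st_elizabeth_keywords):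
--         return "St. Elizabeth Healthcare"
--
--     # Not part of the 5 major systems
--     return "Other"
-- ===== SOURCE B (Python) =====
-- SYSTEMS = [
--     ("Norton Healthcare", ['norton', 'kosair']),
--     ("UofL Health", ['uofl', 'university of louisville', 'u of l', 'jewish hospital', 'peace hospital',
--                      'jewish', 'mary & elizabeth', 'mary and elizabeth', 'shelbyville hospital']),
--     ("Baptist Health", ['baptist']),
--     ("CHI Saint Joseph Health", ['chi saint joseph', 'saint joseph', 'st joseph', 'st. joseph', 'flaget']),
--     ("St. Elizabeth Healthcare", ['st elizabeth', 'st. elizabeth', 'saint elizabeth', 'stelizabeth']),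
-- ]
--
-- # Flat keyword index: (keyword, priority rank, category), built once.
-- KEYWORD_INDEX = [(kw, rank, cat)
--                  for rank, (cat, kws) in enumerate(SYSTEMS)
--                  for kw in kws]
--
-- def categorize_provider(provider_name: str) -> str:
--     """Single pass over the flat keyword index, keeping the minimum-rank match;
--     no early return — every keyword is examined, the best (lowest-rank) hit wins."""
--     name_lower = provider_name.lower()
--     best = None  # (rank, category) of the best match so far
--     for kw, rank, cat in KEYWORD_INDEX:
--         if kw in name_lower and (best is None or rank < best[0]):
--             best = (rank, cat)
--     return best[1] if best is not None else "Other"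
-- ===== Notes on version B (the rewrite author's own statement) =====
-- stated objective: alternative
-- what changed: Replaces the priority-ordered early-return chain of per-system any() checks with one exhaustive pass over a flat (keyword, rank, category) index that accumulates the minimum-rank match and returns it at the end.
import Mathlib
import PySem

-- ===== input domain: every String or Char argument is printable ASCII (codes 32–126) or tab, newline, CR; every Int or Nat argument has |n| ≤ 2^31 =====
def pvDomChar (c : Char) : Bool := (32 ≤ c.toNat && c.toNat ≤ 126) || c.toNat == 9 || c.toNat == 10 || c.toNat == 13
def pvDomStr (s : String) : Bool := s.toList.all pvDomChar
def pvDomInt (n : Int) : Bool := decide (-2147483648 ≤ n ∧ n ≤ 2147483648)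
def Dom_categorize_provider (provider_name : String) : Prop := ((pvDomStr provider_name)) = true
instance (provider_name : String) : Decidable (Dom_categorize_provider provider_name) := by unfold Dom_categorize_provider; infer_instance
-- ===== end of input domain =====

-- B replaces A's priority-ordered early-return chain by one exhaustive pass over a flat
-- (keyword, rank, category) index keeping the minimum-rank match (objective: alternative).

-- ===== PORT A =====
def categorize_provider (provider_name : String) : String :=
  let name_lower := PySem.Str.lower provider_name
  let norton_keywords := ["norton", "kosair"]
  if norton_keywords.any (fun k => PySem.Str.isIn k name_lower) then "Norton Healthcare"
  else
    let uofl_keywords := ["uofl", "university of louisville", "u of l", "jewish hospital", "peace hospital",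
                          "jewish", "mary & elizabeth", "mary and elizabeth", "shelbyville hospital"]
    if uofl_keywords.any (fun k => PySem.Str.isIn k name_lower) then "UofL Health"
    else
      let baptist_keywords := ["baptist"]
      if baptist_keywords.any (fun k => PySem.Str.isIn k name_lower) then "Baptist Health"
      else
        let chi_keywords := ["chi saint joseph", "saint joseph", "st joseph", "st. joseph", "flaget"]
        if chi_keywords.any (fun k => PySem.Str.isIn k name_lower) then "CHI Saint Joseph Health"
        else
          let st_elizabeth_keywords := ["st elizabeth", "st. elizabeth", "saint elizabeth", "stelizabeth"]
          if st_elizabeth_keywords.any (fun k => PySem.Str.isIn k name_lower) then "St. Elizabeth Healthcare"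
          else "Other"

-- ===== PORT B =====
def pvSystems : List (String × List String) :=
  [("Norton Healthcare", ["norton", "kosair"]),
   ("UofL Health", ["uofl", "university of louisville", "u of l", "jewish hospital", "peace hospital",
                    "jewish", "mary & elizabeth", "mary and elizabeth", "shelbyville hospital"]),
   ("Baptist Health", ["baptist"]),
   ("CHI Saint Joseph Health", ["chi saint joseph", "saint joseph", "st joseph", "st. joseph", "flaget"]),
   ("St. Elizabeth Healthcare", ["st elizabeth", "st. elizabeth", "saint elizabeth", "stelizabeth"])]

-- the comprehension building the flat keyword index in Source B
def pvKeywordIndex : List (String × Int × String) :=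
  (PySem.List.enumerate pvSystems).flatMap (fun p => p.2.2.map (fun kw => (kw, p.1, p.2.1)))

-- the loop body of Source B's single pass (best is the (rank, category) of the best match so far)
def pvStep (name_lower : String) (best : Option (Int × String)) (e : String × Int × String) :
    Option (Int × String) :=
  if PySem.Str.isIn e.1 name_lower &&
     (match best with | none => true | some b => decide (e.2.1 < b.1)) then
    some (e.2.1, e.2.2)
  else best

def categorize_provider_alt (provider_name : String) : String :=
  let name_lower := PySem.Str.lower provider_name
  match pvKeywordIndex.foldl (pvStep name_lower) none with
  | some b => b.2
  | none => "Other"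

-- ===== PRECONDITION & SPEC =====
def Spec_categorize_provider (provider_name : String) (out : String) : Prop := out = categorize_provider_alt provider_name
instance (provider_name : String) (out : String) : Decidable (Spec_categorize_provider provider_name out) := by unfold Spec_categorize_provider; infer_instance

-- ===== CLAIM (what is proved, stated in full; the proofs are below) =====
def Claim_equal_categorize_provider : Prop := ∀ (provider_name : String), Dom_categorize_provider provider_name → Spec_categorize_provider provider_name (categorize_provider provider_name)

-- ===== LEMMAS AND PROOFS =====

/-- merging the best-so-far with a candidate of rank `r`, category `c`. -/
def pvMerge (acc : Option (Int × String)) (r : Int) (c : String) : Option (Int × String) :=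
  match acc with
  | none => some (r, c)
  | some b => if r < b.1 then some (r, c) else acc

theorem pvMerge_idem (acc : Option (Int × String)) (r : Int) (c : String) :
    pvMerge (pvMerge acc r c) r c = pvMerge acc r c := by
  cases acc with
  | none => simp [pvMerge]
  | some b =>
    simp only [pvMerge]
    by_cases h : r < b.1 <;> simp [h]

/-- folding Source B's loop body over a constant-rank keyword segment is: merge once iff any keyword hits. -/
theorem pvFold_const (nl : String) (r : Int) (c : String) :
    ∀ (kws : List String) (acc : Option (Int × String)),
      (kws.map (fun kw => (kw, r, c))).foldl (pvStep nl) acc =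
        if kws.any (fun k => PySem.Str.isIn k nl) then pvMerge acc r c else acc := by
  intro kws
  induction kws with
  | nil => intro acc; simp
  | cons kw rest ih =>
    intro acc
    simp only [List.map_cons, List.foldl_cons, List.any_cons]
    by_cases h : PySem.Str.isIn kw nl = true
    · have hstep : pvStep nl acc (kw, r, c) = pvMerge acc r c := by
        cases acc with
        | none =>
          simp only [pvStep, pvMerge, h, Bool.true_and]
          exact if_pos trivial
        | some b =>
          simp only [pvStep, pvMerge, h, Bool.true_and, decide_eq_true_eq]
      rw [hstep, ih]
      have hc : ((PySem.Str.isIn kw nl || rest.any fun k => PySem.Str.isIn k nl) = true) := by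
        rw [h]; simp
      rw [if_pos hc]
      by_cases ha : (rest.any fun k => PySem.Str.isIn k nl) = true
      · rw [if_pos ha, pvMerge_idem]
      · rw [if_neg ha]
    · have hf : PySem.Str.isIn kw nl = false := by simpa using h
      have hstep : pvStep nl acc (kw, r, c) = acc := by
        simp only [pvStep, hf, Bool.false_and, Bool.false_eq_true, if_false]
      rw [hstep, ih]
      by_cases ha : (rest.any fun k => PySem.Str.isIn k nl) = true
      · rw [if_pos ha, if_pos (by rw [ha]; exact Bool.or_true _)]
      · have hfa : (rest.any fun k => PySem.Str.isIn k nl) = false := by simpa using ha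
        rw [if_neg ha, if_neg (by rw [hf, hfa]; decide)]

-- ===== VERDICT (by name: the statement is the Claim_ definition above) =====
theorem categorize_provider_spec : Claim_equal_categorize_provider := by
  intro s _
  unfold Spec_categorize_provider
  simp only [categorize_provider, categorize_provider_alt]
  have hidx : pvKeywordIndex =
      (["norton", "kosair"].map (fun kw => (kw, (0 : Int), "Norton Healthcare"))) ++
      ((["uofl", "university of louisville", "u of l", "jewish hospital", "peace hospital",
         "jewish", "mary & elizabeth", "mary and elizabeth", "shelbyville hospital"].map
          (fun kw => (kw, (1 : Int), "UofL Health"))) ++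
      ((["baptist"].map (fun kw => (kw, (2 : Int), "Baptist Health"))) ++
      ((["chi saint joseph", "saint joseph", "st joseph", "st. joseph", "flaget"].map
          (fun kw => (kw, (3 : Int), "CHI Saint Joseph Health"))) ++
      (["st elizabeth", "st. elizabeth", "saint elizabeth", "stelizabeth"].map
          (fun kw => (kw, (4 : Int), "St. Elizabeth Healthcare")))))) := by rfl
  rw [hidx]
  simp only [List.foldl_append, pvFold_const]
  split_ifs <;> rfl
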